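-- pv_equiv track=rewrite | github.com/devaun23/ShelfSense | backend/app/services/content_management_agent.py | _normalize_specialty
-- ===== SOURCE A (Python) =====
-- from typing import Optional, Dict, List, Any, Tuple
--
-- SPECIALTIES = {
--     "internal_medicine": ["Internal Medicine", "Medicine", "IM"],
--     "surgery": ["Surgery", "Surg"],
--     "pediatrics": ["Pediatrics", "Peds"],
--     "obstetrics_gynecology": ["OB/GYN", "Obstetrics", "Gynecology", "ObGyn"],
--     "psychiatry": ["Psychiatry", "Psych"],
--     "neurology": ["Neurology", "Neuro"],
--     "family_medicine": ["Family Medicine", "FM"],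
--     "emergency_medicine": ["Emergency Medicine", "EM"],
-- }
--
-- def _normalize_specialty(specialty: Optional[str]) -> Optional[str]:
--     """Normalize specialty names to consistent format."""
--
--     if not specialty:
--         return None
--
--     specialty_lower = specialty.lower().strip()
--
--     for normalized, aliases in SPECIALTIES.items():
--         if specialty_lower == normalized:
--             return normalized
--         for alias in aliases:
--             if specialty_lower == alias.lower():
--                 return normalized
--
--     return specialty_lower.replace(" ", "_")
-- ===== SOURCE B (Python) =====
-- from typing import Optional, Dict, List, Any, Tuple
--
-- SPECIALTIES = {
--     "internal_medicine": ["Internal Medicine", "Medicine", "IM"],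
--     "surgery": ["Surgery", "Surg"],
--     "pediatrics": ["Pediatrics", "Peds"],
--     "obstetrics_gynecology": ["OB/GYN", "Obstetrics", "Gynecology", "ObGyn"],
--     "psychiatry": ["Psychiatry", "Psych"],
--     "neurology": ["Neurology", "Neuro"],
--     "family_medicine": ["Family Medicine", "FM"],
--     "emergency_medicine": ["Emergency Medicine", "EM"],
-- }
--
-- # Only the aliases whose snake_cased lower form is NOT already the canonical key
-- # (e.g. "IM", "OB/GYN"); regular aliases like "Internal Medicine" are handled by
-- # the canonicalize-then-membership-test path and need no table entry.
-- IRREGULAR = {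
--     a.lower(): n
--     for n, aliases in SPECIALTIES.items()
--     for a in aliases
--     if a.lower().replace(" ", "_") != n
-- }
--
-- def _normalize_specialty(specialty: Optional[str]) -> Optional[str]:
--     """Normalize specialty names: canonicalize the input first, then test membership."""
--     if not specialty:
--         return None
--     candidate = specialty.lower().strip().replace(" ", "_")
--     if candidate in SPECIALTIES:
--         return candidate
--     return IRREGULAR.get(specialty.lower().strip(), candidate)
-- ===== Notes on version B (the rewrite author's own statement) =====
-- stated objective: alternative
-- what changed: Instead of scanning SPECIALTIES comparing the input against every key and alias, B canonicalizes the input first (lower/strip/snake_case) and tests membership in SPECIALTIES' keys, falling back to a small derived table holding only the irregular aliases (those whose snake_cased lower form is not already the key).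
import Mathlib
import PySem

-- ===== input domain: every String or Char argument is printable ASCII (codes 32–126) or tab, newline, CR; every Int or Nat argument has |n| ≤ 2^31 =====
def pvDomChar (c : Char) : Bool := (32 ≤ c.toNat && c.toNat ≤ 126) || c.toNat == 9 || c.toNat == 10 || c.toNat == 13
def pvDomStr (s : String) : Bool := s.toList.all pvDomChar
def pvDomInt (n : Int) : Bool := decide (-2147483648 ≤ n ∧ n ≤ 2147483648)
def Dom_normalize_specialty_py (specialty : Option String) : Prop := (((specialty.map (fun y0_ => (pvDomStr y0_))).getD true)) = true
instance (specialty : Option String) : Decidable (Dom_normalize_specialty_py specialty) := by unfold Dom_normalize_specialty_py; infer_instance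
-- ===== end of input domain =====

-- B canonicalizes the input FIRST (snake_case it) and tests membership in SPECIALTIES' keys,
-- falling back to a small table of only the irregular aliases, instead of A's scan comparing
-- the raw input against every alias (alternative decomposition); return values agree everywhere.

-- module-level constant SPECIALTIES (shared data, used by both ports)
def pvSPECIALTIES : List (String × List String) :=
  [("internal_medicine", ["Internal Medicine", "Medicine", "IM"]),
   ("surgery", ["Surgery", "Surg"]),
   ("pediatrics", ["Pediatrics", "Peds"]),
   ("obstetrics_gynecology", ["OB/GYN", "Obstetrics", "Gynecology", "ObGyn"]),
   ("psychiatry", ["Psychiatry", "Psych"]),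
   ("neurology", ["Neurology", "Neuro"]),
   ("family_medicine", ["Family Medicine", "FM"]),
   ("emergency_medicine", ["Emergency Medicine", "EM"])]

-- ===== PORT A =====
-- inner 'for alias in aliases' loop (returns 'some normalized' on the first match)
def pvInnerA (t norm : String) : List String → Option String
  | [] => none
  | a :: rest => if t == PySem.Str.lower a then some norm else pvInnerA t norm rest

-- outer 'for normalized, aliases in SPECIALTIES.items()' loop
def pvLoopA (t : String) : List (String × List String) → Option String
  | [] => none
  | (norm, aliases) :: rest =>
      if t == norm then some norm
      else match pvInnerA t norm aliases with
           | some r => some r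
           | none => pvLoopA t rest

def normalize_specialty_py (specialty : Option String) : Option String :=
  match specialty with
  | none => none
  | some s =>
      if s == "" then none    -- 'if not specialty'
      else
        let t := PySem.Str.strip (PySem.Str.lower s)
        match pvLoopA t pvSPECIALTIES with
        | some r => some r
        | none => some (PySem.Str.replace t " " "_")

-- ===== PORT B =====
-- the SPECIALTIES dict itself (Python membership test 'candidate in SPECIALTIES')
def pvSPEC_DICT : PySem.Dict String (List String) := PySem.Dict.ofList pvSPECIALTIES

-- IRREGULAR = {a.lower(): n for n, aliases in SPECIALTIES.items() for a in aliases
--              if a.lower().replace(" ", "_") != n}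
def pvIRREGULAR : PySem.Dict String String :=
  pvSPECIALTIES.foldl
    (fun d p => p.2.foldl
      (fun d' a =>
        if PySem.Str.replace (PySem.Str.lower a) " " "_" ≠ p.1
        then d'.insert (PySem.Str.lower a) p.1 else d') d)
    PySem.Dict.empty

def normalize_specialty_py_alt (specialty : Option String) : Option String :=
  match specialty with
  | none => none
  | some s =>
      if s == "" then none    -- 'if not specialty'
      else
        let candidate := PySem.Str.replace (PySem.Str.strip (PySem.Str.lower s)) " " "_"
        if pvSPEC_DICT.contains candidate then some candidate
        else some (pvIRREGULAR.getD (PySem.Str.strip (PySem.Str.lower s)) candidate)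

-- ===== PRECONDITION & SPEC =====
def Spec_normalize_specialty_py (specialty : Option String) (out : Option String) : Prop := out = normalize_specialty_py_alt specialty
instance (specialty : Option String) (out : Option String) : Decidable (Spec_normalize_specialty_py specialty out) := by unfold Spec_normalize_specialty_py; infer_instance

-- ===== CLAIM =====
def Claim_equal_normalize_specialty_py : Prop := ∀ (specialty : Option String), Dom_normalize_specialty_py specialty → Spec_normalize_specialty_py specialty (normalize_specialty_py specialty)

-- ===== LEMMAS AND PROOFS =====
-- pvIRREGULAR evaluated to its literal association list
theorem pvIRREGULAR_eq : pvIRREGULAR = PySem.Dict.mk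
    [("medicine", "internal_medicine"), ("im", "internal_medicine"),
     ("surg", "surgery"), ("peds", "pediatrics"),
     ("ob/gyn", "obstetrics_gynecology"), ("obstetrics", "obstetrics_gynecology"),
     ("gynecology", "obstetrics_gynecology"), ("obgyn", "obstetrics_gynecology"),
     ("psych", "psychiatry"), ("neuro", "neurology"),
     ("fm", "family_medicine"), ("em", "emergency_medicine")] := by decide

-- core: for every already lowered/stripped string t, A's scan-result-or-fallback equals
-- B's canonicalize-then-membership-test-or-irregular-lookup
theorem pvCore (t : String) :
    (match pvLoopA t pvSPECIALTIES with
     | some r => some r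
     | none => some (PySem.Str.replace t " " "_")) =
    (if pvSPEC_DICT.contains (PySem.Str.replace t " " "_")
     then some (PySem.Str.replace t " " "_")
     else some (pvIRREGULAR.getD t (PySem.Str.replace t " " "_"))) := by
  by_cases h0 : t = "internal_medicine"
  · subst h0; decide
  by_cases h1 : t = "internal medicine"
  · subst h1; decide
  by_cases h2 : t = "medicine"
  · subst h2; decide
  by_cases h3 : t = "im"
  · subst h3; decide
  by_cases h4 : t = "surgery"
  · subst h4; decide
  by_cases h5 : t = "surg"
  · subst h5; decide
  by_cases h6 : t = "pediatrics"
  · subst h6; decide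
  by_cases h7 : t = "peds"
  · subst h7; decide
  by_cases h8 : t = "obstetrics_gynecology"
  · subst h8; decide
  by_cases h9 : t = "ob/gyn"
  · subst h9; decide
  by_cases h10 : t = "obstetrics"
  · subst h10; decide
  by_cases h11 : t = "gynecology"
  · subst h11; decide
  by_cases h12 : t = "obgyn"
  · subst h12; decide
  by_cases h13 : t = "psychiatry"
  · subst h13; decide
  by_cases h14 : t = "psych"
  · subst h14; decide
  by_cases h15 : t = "neurology"
  · subst h15; decide
  by_cases h16 : t = "neuro"
  · subst h16; decide
  by_cases h17 : t = "family_medicine"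
  · subst h17; decide
  by_cases h18 : t = "family medicine"
  · subst h18; decide
  by_cases h19 : t = "fm"
  · subst h19; decide
  by_cases h20 : t = "emergency_medicine"
  · subst h20; decide
  by_cases h21 : t = "emergency medicine"
  · subst h21; decide
  by_cases h22 : t = "em"
  · subst h22; decide
  -- default: t matches no key and no alias, so A's scan returns none and A yields the fallback u;
  -- B yields u in both branches (the irregular table has no entry for t either)
  have hloop : pvLoopA t pvSPECIALTIES = none := by
    simp [pvLoopA, pvInnerA, pvSPECIALTIES,
        show PySem.Str.lower "Internal Medicine" = "internal medicine" from by decide,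
        show PySem.Str.lower "Medicine" = "medicine" from by decide,
        show PySem.Str.lower "IM" = "im" from by decide,
        show PySem.Str.lower "Surgery" = "surgery" from by decide,
        show PySem.Str.lower "Surg" = "surg" from by decide,
        show PySem.Str.lower "Pediatrics" = "pediatrics" from by decide,
        show PySem.Str.lower "Peds" = "peds" from by decide,
        show PySem.Str.lower "OB/GYN" = "ob/gyn" from by decide,
        show PySem.Str.lower "Obstetrics" = "obstetrics" from by decide,
        show PySem.Str.lower "Gynecology" = "gynecology" from by decide,
        show PySem.Str.lower "ObGyn" = "obgyn" from by decide,
        show PySem.Str.lower "Psychiatry" = "psychiatry" from by decide,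
        show PySem.Str.lower "Psych" = "psych" from by decide,
        show PySem.Str.lower "Neurology" = "neurology" from by decide,
        show PySem.Str.lower "Neuro" = "neuro" from by decide,
        show PySem.Str.lower "Family Medicine" = "family medicine" from by decide,
        show PySem.Str.lower "FM" = "fm" from by decide,
        show PySem.Str.lower "Emergency Medicine" = "emergency medicine" from by decide,
        show PySem.Str.lower "EM" = "em" from by decide,
        h0, h1, h2, h3, h4, h5, h6, h7, h8, h9, h10, h11, h12, h13, h14, h15,
        h16, h17, h18, h19, h20, h21, h22]
  have hirr : pvIRREGULAR.getD t (PySem.Str.replace t " " "_")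
      = PySem.Str.replace t " " "_" := by
    rw [pvIRREGULAR_eq, PySem.Dict.getD_eq_get?_getD]
    simp [PySem.Dict.get?_mk_cons,
        Ne.symm h2, Ne.symm h3, Ne.symm h5, Ne.symm h7, Ne.symm h9, Ne.symm h10,
        Ne.symm h11, Ne.symm h12, Ne.symm h14, Ne.symm h16, Ne.symm h19, Ne.symm h22,
        show (PySem.Dict.mk ([] : List (String × String))).get? t = none from rfl]
  rw [hloop, hirr]
  by_cases hc : pvSPEC_DICT.contains (PySem.Str.replace t " " "_") = true <;> simp [hc]

-- ===== VERDICT =====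
theorem normalize_specialty_py_spec : Claim_equal_normalize_specialty_py := by
  intro specialty _
  unfold Spec_normalize_specialty_py normalize_specialty_py normalize_specialty_py_alt
  cases specialty with
  | none => rfl
  | some s =>
      by_cases h : s == ""
      · simp [h]
      · simp only [h, Bool.false_eq_true, if_false]
        exact pvCore (PySem.Str.strip (PySem.Str.lower s))
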